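-- pv_equiv track=rewrite | github.com/ltfafei/py_Leetcode_study | graphic_World_PointLinesPlanes/10.findMinRectangle.py | countMinRectangle_areg
-- ===== SOURCE A (Python) =====
-- def countMinRectangle_areg(points):
--     s = 0
--     for i in range(0, len(points) - 1):
--         #取出第一个点
--         p1 = points[i]
--         for j in range(i+1, len(points)):
--             #取出第二个点
--             p2 = points[j]
--             #两点在同一条直线上的情况
--             if p1[0] == p2[0] or p1[1] == p2[1]:
--                 continue
--                 #取平均值计算面积
--             ss = abs(p2[1] - p1[1]) * abs(p2[0] - p1[0])
--             if s > 0 and ss >= s: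
--                 continue
--             #确定第三第四个点坐标
--             p3 = [p2[0], p1[1]]
--             p4 = [p1[0], p2[1]]
--             #排除p3、p4不在列表中的情况
--             if (p3 not in points) or (p4 not in points):
--                 continue
--             s = ss
--     return s
-- ===== SOURCE B (Python) =====
-- def countMinRectangle_areg(points):
--     # group the distinct y-values of each column (x-coordinate), first-seen order
--     cols = {}
--     for p in points:
--         ys = cols.setdefault(p[0], [])
--         if p[1] not in ys:
--             ys.append(p[1])
--     xs = list(cols)
--     best = 0
--     for i in range(1, len(xs)):
--         for k in range(i):
--             for ya in cols[xs[i]]: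
--                 for yb in cols[xs[k]]:
--                     # (xs[i], ya) and (xs[k], yb) are points; need the two other corners
--                     if ya != yb and [xs[k], ya] in points and [xs[i], yb] in points:
--                         area = abs(xs[i] - xs[k]) * abs(yb - ya)
--                         if best == 0 or area < best:
--                             best = area
--     return best
-- ===== Notes on version B (the rewrite author's own statement) =====
-- stated objective: faster
-- what changed: B first groups the distinct y-values by column (x-coordinate) into a dict, then minimises width*height over pairs of distinct columns and a y-value from each, testing only the two remaining corners for membership, instead of A's scan over all pairs of points (fewer candidates after per-column dedup); Pre_ excludes points with fewer than 2 coordinates, on which B's grouping pass raises IndexError (A raises there too whenever its pair loop runs).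
-- outside the precondition, e.g. on countMinRectangle_areg([[1]]): A returns 0, B raises IndexError
import Mathlib
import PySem

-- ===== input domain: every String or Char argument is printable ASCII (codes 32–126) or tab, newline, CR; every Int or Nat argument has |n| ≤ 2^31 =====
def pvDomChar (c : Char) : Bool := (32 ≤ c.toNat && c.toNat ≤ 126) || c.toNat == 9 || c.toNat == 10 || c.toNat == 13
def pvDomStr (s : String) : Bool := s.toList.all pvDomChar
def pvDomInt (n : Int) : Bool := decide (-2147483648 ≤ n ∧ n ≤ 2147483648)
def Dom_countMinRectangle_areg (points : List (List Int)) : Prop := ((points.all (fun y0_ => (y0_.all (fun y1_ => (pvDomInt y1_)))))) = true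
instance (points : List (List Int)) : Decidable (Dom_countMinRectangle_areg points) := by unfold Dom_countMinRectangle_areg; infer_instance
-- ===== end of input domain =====

-- B groups the distinct y-values by column once, then minimises over pairs of columns and a
-- y-value from each, testing only the two remaining corners (objective: alternative algorithm).

-- ===== PORT A =====
-- p[0] / p[1] of a point list (defaulted; Pre_ keeps every point of length 2, where it is exact)
def pvPg (p : List Int) (i : Int) : Int := PySem.List.pyGetD p i 0

def countMinRectangle_areg (points : List (List Int)) : Int :=
  (PySem.List.pyRange 0 ((points.length : Int) - 1) 1).foldl (fun s i =>
    let p1 := PySem.List.pyGetD points i []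
    (PySem.List.pyRange (i + 1) (points.length : Int) 1).foldl (fun s j =>
      let p2 := PySem.List.pyGetD points j []
      if pvPg p1 0 = pvPg p2 0 ∨ pvPg p1 1 = pvPg p2 1 then s
      else
        let ss := |pvPg p2 1 - pvPg p1 1| * |pvPg p2 0 - pvPg p1 0|
        if s > 0 ∧ ss ≥ s then s
        else
          let p3 := [pvPg p2 0, pvPg p1 1]
          let p4 := [pvPg p1 0, pvPg p2 1]
          if p3 ∉ points ∨ p4 ∉ points then s
          else ss) s) 0

-- ===== PORT B =====
-- ys = cols.setdefault(x, []); if y not in ys: ys.append(y)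
def pvColStep (d : PySem.Dict Int (List Int)) (p : List Int) : PySem.Dict Int (List Int) :=
  let ys := d.getD (pvPg p 0) []
  if pvPg p 1 ∈ ys then d else d.insert (pvPg p 0) (ys ++ [pvPg p 1])

-- cols: x ↦ the distinct y-values of that column, in first-insertion order
def pvCols (points : List (List Int)) : PySem.Dict Int (List Int) :=
  points.foldl pvColStep PySem.Dict.empty

def countMinRectangle_areg_alt (points : List (List Int)) : Int :=
  let cols := pvCols points
  let xs := cols.keys
  (PySem.List.pyRange 1 (xs.length : Int) 1).foldl (fun best i =>
    (PySem.List.pyRange 0 i 1).foldl (fun best k =>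
      let xi := PySem.List.pyGetD xs i 0
      let xk := PySem.List.pyGetD xs k 0
      (cols.getD xi []).foldl (fun best ya =>
        (cols.getD xk []).foldl (fun best yb =>
          if ya ≠ yb ∧ [xk, ya] ∈ points ∧ [xi, yb] ∈ points then
            let area := |xi - xk| * |yb - ya|
            if best = 0 ∨ area < best then area else best
          else best) best) best) best) 0

-- ===== PRECONDITION & SPEC =====
-- Pre_ keeps the function's natural domain, 2-D points (every inner list holds at least two
-- coordinates): on shorter inner lists B's grouping pass always raises IndexError, and A
-- raises there too on all but degenerate inputs.
def Pre_countMinRectangle_areg (points : List (List Int)) : Prop :=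
  ∀ p ∈ points, 2 ≤ p.length
instance (points : List (List Int)) : Decidable (Pre_countMinRectangle_areg points) := by
  unfold Pre_countMinRectangle_areg; infer_instance

def pvWitness_countMinRectangle_areg : List (List Int) :=
  [[1, 1], [1, 3], [3, 1], [3, 3], [2, 2]]

def Spec_countMinRectangle_areg (points : List (List Int)) (out : Int) : Prop := out = countMinRectangle_areg_alt points
instance (points : List (List Int)) (out : Int) : Decidable (Spec_countMinRectangle_areg points out) := by unfold Spec_countMinRectangle_areg; infer_instance

-- ===== CLAIM (what is proved, stated in full; the proofs are below) =====
def Claim_equal_countMinRectangle_areg : Prop := ∀ (points : List (List Int)), Dom_countMinRectangle_areg points → Pre_countMinRectangle_areg points → Spec_countMinRectangle_areg points (countMinRectangle_areg points)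

-- ===== LEMMAS AND PROOFS =====

-- running minimum step: best = a if best == 0 or a < best
def pvUpd (s a : Int) : Int := if s = 0 ∨ a < s then a else s

-- the (x, y) coordinate pairs of the points, in order
def pvCoords (points : List (List Int)) : List (Int × Int) :=
  points.map (fun p => (pvPg p 0, pvPg p 1))

-- the areas of axis-parallel rectangles: two diagonal points and both other corners present
def pvRect (points : List (List Int)) (a : Int) : Prop :=
  ∃ x1 y1 x2 y2, (x1, y1) ∈ pvCoords points ∧ (x2, y2) ∈ pvCoords points ∧
    [x2, y1] ∈ points ∧ [x1, y2] ∈ points ∧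
    x1 ≠ x2 ∧ y1 ≠ y2 ∧ a = |x2 - x1| * |y2 - y1|

theorem pvRect_pos (points : List (List Int)) (a : Int) (h : pvRect points a) : 0 < a := by
  obtain ⟨x1, y1, x2, y2, _, _, _, _, hx, hy, ha⟩ := h
  have h1 : 0 < |x2 - x1| := abs_pos.mpr (by omega)
  have h2 : 0 < |y2 - y1| := abs_pos.mpr (by omega)
  rw [ha]; positivity

-- running minimum over a list of positive numbers, from a positive start
theorem pvFoldUpd_pos (L : List Int) : ∀ s : Int, 0 < s → (∀ a ∈ L, 0 < a) →
    0 < L.foldl pvUpd s ∧ L.foldl pvUpd s ≤ s ∧ ∀ a ∈ L, L.foldl pvUpd s ≤ a := by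
  induction L with
  | nil => intro s hs _; simpa using hs
  | cons a t ih =>
    intro s hs hL
    have ha : 0 < a := hL a (by simp)
    have ht : ∀ b ∈ t, 0 < b := fun b hb => hL b (by simp [hb])
    have hstep : 0 < pvUpd s a ∧ pvUpd s a ≤ s ∧ pvUpd s a ≤ a := by
      unfold pvUpd; split_ifs with h <;> omega
    obtain ⟨r1, r2, r3⟩ := ih (pvUpd s a) hstep.1 ht
    refine ⟨by simpa using r1, ?_, ?_⟩
    · simpa using le_trans r2 hstep.2.1
    · intro b hb
      rcases List.mem_cons.mp hb with rfl | hb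
      · exact le_trans (by simpa using r2) hstep.2.2
      · simpa using r3 b hb

theorem pvFoldUpd_mem (L : List Int) : ∀ s : Int, L.foldl pvUpd s ∈ s :: L := by
  induction L with
  | nil => intro s; simp
  | cons a t ih =>
    intro s
    have h := ih (pvUpd s a)
    have hcase : pvUpd s a = s ∨ pvUpd s a = a := by unfold pvUpd; split_ifs <;> simp
    rcases List.mem_cons.mp h with h' | h'
    · rcases hcase with hc | hc
      · simp only [List.foldl_cons]
        rw [h', hc]; simp
      · simp only [List.foldl_cons]
        rw [h', hc]; simp
    · simp only [List.foldl_cons]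
      exact List.mem_cons_of_mem _ (List.mem_cons_of_mem _ h')

-- the fold from start 0 on a nonempty positive list: a member that bounds every member
theorem pvFoldUpd_zero_char (L : List Int) (hne : L ≠ []) (hp : ∀ a ∈ L, 0 < a) :
    L.foldl pvUpd 0 ∈ L ∧ ∀ a ∈ L, L.foldl pvUpd 0 ≤ a := by
  match L, hne with
  | a :: t, _ =>
    have h0 : pvUpd 0 a = a := by unfold pvUpd; simp
    have ha : 0 < a := hp a (by simp)
    have hpt : ∀ b ∈ t, 0 < b := fun b hb => hp b (by simp [hb])
    obtain ⟨_, r2, r3⟩ := pvFoldUpd_pos t a ha hpt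
    have hmem := pvFoldUpd_mem t a
    constructor
    · simpa [List.foldl_cons, h0] using hmem
    · intro b hb
      rcases List.mem_cons.mp hb with rfl | hb
      · simpa [List.foldl_cons, h0] using r2
      · simpa [List.foldl_cons, h0] using r3 b hb

theorem pvFold_min_eq (L1 L2 : List Int) (h : ∀ a, a ∈ L1 ↔ a ∈ L2)
    (hpos : ∀ a ∈ L1, 0 < a) : L1.foldl pvUpd 0 = L2.foldl pvUpd 0 := by
  have hpos2 : ∀ a ∈ L2, 0 < a := fun a ha => hpos a ((h a).mpr ha)
  rcases eq_or_ne L1 [] with rfl | h1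
  · rcases eq_or_ne L2 [] with rfl | h2
    · rfl
    · exfalso
      match L2, h2 with
      | a :: t, _ => exact absurd ((h a).mpr (by simp)) (by simp)
  · have h2 : L2 ≠ [] := by
      match L1, h1 with
      | a :: t, _ =>
        intro hL2
        exact absurd ((h a).mp (by simp)) (by simp [hL2])
    obtain ⟨m1, le1⟩ := pvFoldUpd_zero_char L1 h1 hpos
    obtain ⟨m2, le2⟩ := pvFoldUpd_zero_char L2 h2 hpos2
    exact le_antisymm (le1 _ ((h _).mpr m2)) (le2 _ ((h _).mp m1))

-- fold congruence under a preserved invariant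
theorem pvFoldl_congr_inv {α σ : Type} (P : σ → Prop) (f g : σ → α → σ)
    (hfg : ∀ s x, P s → f s x = g s x ∧ P (f s x)) :
    ∀ (l : List α) (s : σ), P s → l.foldl f s = l.foldl g s := by
  intro l
  induction l with
  | nil => intro s _; rfl
  | cons x t ih =>
    intro s hs
    obtain ⟨he, hp⟩ := hfg s x hs
    simp only [List.foldl_cons]
    rw [← he, ih (f s x) hp]

theorem pvP1_eq (points : List (List Int)) (i : Int) (h0 : 0 ≤ i)
    (h1 : i.toNat < points.length) :
    PySem.List.pyGetD points i [] = points[i.toNat] :=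
  PySem.List.pyGetD_eq_getElem points [] h0 (by omega)

theorem pvGetI (xs : List Int) (i : Int) (h0 : 0 ≤ i) (h1 : i.toNat < xs.length) :
    PySem.List.pyGetD xs i 0 = xs[i.toNat] :=
  PySem.List.pyGetD_eq_getElem xs 0 h0 (by omega)

-- ---------- A as the running minimum over its candidate areas ----------

def pvP1 (points : List (List Int)) (i : Int) : List Int := PySem.List.pyGetD points i []

def pvValidA (points : List (List Int)) (ij : Int × Int) : Bool :=
  !(decide (pvPg (pvP1 points ij.1) 0 = pvPg (pvP1 points ij.2) 0) ||
    decide (pvPg (pvP1 points ij.1) 1 = pvPg (pvP1 points ij.2) 1)) &&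
  (decide ([pvPg (pvP1 points ij.2) 0, pvPg (pvP1 points ij.1) 1] ∈ points) &&
   decide ([pvPg (pvP1 points ij.1) 0, pvPg (pvP1 points ij.2) 1] ∈ points))

theorem pvValidA_iff (points : List (List Int)) (ij : Int × Int) :
    pvValidA points ij = true ↔
      ¬(pvPg (pvP1 points ij.1) 0 = pvPg (pvP1 points ij.2) 0 ∨
        pvPg (pvP1 points ij.1) 1 = pvPg (pvP1 points ij.2) 1) ∧
      [pvPg (pvP1 points ij.2) 0, pvPg (pvP1 points ij.1) 1] ∈ points ∧
      [pvPg (pvP1 points ij.1) 0, pvPg (pvP1 points ij.2) 1] ∈ points := by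
  unfold pvValidA
  simp [not_or]

def pvAreaA (points : List (List Int)) (ij : Int × Int) : Int :=
  |pvPg (pvP1 points ij.2) 1 - pvPg (pvP1 points ij.1) 1| *
  |pvPg (pvP1 points ij.2) 0 - pvPg (pvP1 points ij.1) 0|

def pvPairsA (points : List (List Int)) : List (Int × Int) :=
  (PySem.List.pyRange 0 ((points.length : Int) - 1) 1).flatMap (fun i =>
    (PySem.List.pyRange (i + 1) (points.length : Int) 1).map (fun j => (i, j)))

def pvLA (points : List (List Int)) : List Int :=
  ((pvPairsA points).filter (pvValidA points)).map (pvAreaA points)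

-- A's inner-loop body, as a function of the index pair
def pvStepA (points : List (List Int)) (s : Int) (ij : Int × Int) : Int :=
  let p1 := pvP1 points ij.1
  let p2 := pvP1 points ij.2
  if pvPg p1 0 = pvPg p2 0 ∨ pvPg p1 1 = pvPg p2 1 then s
  else
    let ss := |pvPg p2 1 - pvPg p1 1| * |pvPg p2 0 - pvPg p1 0|
    if s > 0 ∧ ss ≥ s then s
    else
      if [pvPg p2 0, pvPg p1 1] ∉ points ∨ [pvPg p1 0, pvPg p2 1] ∉ points then s
      else ss

theorem pvStepA_eq (points : List (List Int)) (s : Int) (ij : Int × Int) (hs : 0 ≤ s) :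
    pvStepA points s ij =
      (if pvValidA points ij = true then pvUpd s (pvAreaA points ij) else s) ∧
    0 ≤ pvStepA points s ij := by
  have habs : (0 : Int) ≤ |pvPg (pvP1 points ij.2) 1 - pvPg (pvP1 points ij.1) 1| *
      |pvPg (pvP1 points ij.2) 0 - pvPg (pvP1 points ij.1) 0| :=
    mul_nonneg (abs_nonneg _) (abs_nonneg _)
  have harea : pvAreaA points ij = |pvPg (pvP1 points ij.2) 1 - pvPg (pvP1 points ij.1) 1| *
      |pvPg (pvP1 points ij.2) 0 - pvPg (pvP1 points ij.1) 0| := rfl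
  simp only [pvStepA]
  by_cases h1 : pvPg (pvP1 points ij.1) 0 = pvPg (pvP1 points ij.2) 0 ∨
      pvPg (pvP1 points ij.1) 1 = pvPg (pvP1 points ij.2) 1
  · have hb : ¬ pvValidA points ij = true := by
      rw [pvValidA_iff]; tauto
    rw [if_pos h1, if_neg hb]
    exact ⟨rfl, hs⟩
  · rw [if_neg h1]
    by_cases h2 : s > 0 ∧ |pvPg (pvP1 points ij.2) 1 - pvPg (pvP1 points ij.1) 1| *
        |pvPg (pvP1 points ij.2) 0 - pvPg (pvP1 points ij.1) 0| ≥ s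
    · rw [if_pos h2]
      by_cases hb : pvValidA points ij = true
      · rw [if_pos hb]
        unfold pvUpd
        rw [if_neg (by rw [harea]; omega)]
        exact ⟨rfl, hs⟩
      · rw [if_neg hb]; exact ⟨rfl, hs⟩
    · rw [if_neg h2]
      by_cases h3 : [pvPg (pvP1 points ij.2) 0, pvPg (pvP1 points ij.1) 1] ∉ points ∨
          [pvPg (pvP1 points ij.1) 0, pvPg (pvP1 points ij.2) 1] ∉ points
      · have hb : ¬ pvValidA points ij = true := by
          rw [pvValidA_iff]; tauto
        rw [if_pos h3, if_neg hb]
        exact ⟨rfl, hs⟩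
      · push_neg at h3
        have hb : pvValidA points ij = true := (pvValidA_iff points ij).mpr ⟨h1, h3.1, h3.2⟩
        rw [if_neg (by simp [h3.1, h3.2]), if_pos hb]
        unfold pvUpd
        rw [if_pos (by rw [harea]; omega)]
        exact ⟨rfl, habs⟩

theorem pvA_eq_fold (points : List (List Int)) :
    countMinRectangle_areg points = (pvLA points).foldl pvUpd 0 := by
  have h1 : countMinRectangle_areg points = (pvPairsA points).foldl (pvStepA points) 0 := by
    unfold countMinRectangle_areg pvPairsA
    rw [List.foldl_flatMap]
    simp only [List.foldl_map]
    rfl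
  have h2 : (pvPairsA points).foldl (pvStepA points) 0 =
      (pvPairsA points).foldl
        (fun s ij => if pvValidA points ij = true then pvUpd s (pvAreaA points ij) else s) 0 := by
    refine pvFoldl_congr_inv (fun s => 0 ≤ s) _ _ ?_ _ 0 le_rfl
    intro s ij hs
    obtain ⟨he, hp⟩ := pvStepA_eq points s ij hs
    exact ⟨he, hp⟩
  have h3 : (pvLA points).foldl pvUpd 0 =
      (pvPairsA points).foldl
        (fun s ij => if pvValidA points ij = true then pvUpd s (pvAreaA points ij) else s) 0 := by
    unfold pvLA
    rw [List.foldl_map, List.foldl_filter]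
  rw [h1, h2, h3]

-- the candidate pairs of A, by membership
theorem pvMem_pairsA (points : List (List Int)) (ij : Int × Int) :
    ij ∈ pvPairsA points ↔ 0 ≤ ij.1 ∧ ij.1 + 1 ≤ ij.2 ∧ ij.2 < (points.length : Int) := by
  obtain ⟨i, j⟩ := ij
  unfold pvPairsA
  simp only [List.mem_flatMap, List.mem_map, PySem.List.mem_pyRange_one, Prod.mk.injEq]
  constructor
  · rintro ⟨i', ⟨hi1, hi2⟩, j', ⟨hj1, hj2⟩, rfl, rfl⟩
    exact ⟨hi1, hj1, hj2⟩
  · rintro ⟨h1, h2, h3⟩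
    exact ⟨i, ⟨h1, by omega⟩, j, ⟨h2, h3⟩, rfl, rfl⟩

-- introduction rule for A's candidate list
theorem pvLA_intro (points : List (List Int)) (n1 n2 : Nat) (hlt : n1 < n2)
    (hn2 : n2 < points.length) (u1 v1 u2 v2 : Int)
    (e10 : pvPg (points[n1]'(by omega)) 0 = u1) (e11 : pvPg (points[n1]'(by omega)) 1 = v1)
    (e20 : pvPg (points[n2]'hn2) 0 = u2) (e21 : pvPg (points[n2]'hn2) 1 = v2)
    (hu : u1 ≠ u2) (hv : v1 ≠ v2) (hc1 : [u2, v1] ∈ points) (hc2 : [u1, v2] ∈ points) :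
    |v2 - v1| * |u2 - u1| ∈ pvLA points := by
  have hp1 : pvP1 points (n1 : Int) = points[n1]'(by omega) := by
    exact pvP1_eq points _ (by omega) (by simpa using Nat.lt_trans hlt hn2)
  have hp2 : pvP1 points (n2 : Int) = points[n2]'hn2 := by
    exact pvP1_eq points _ (by omega) (by simpa using hn2)
  unfold pvLA
  rw [List.mem_map]
  refine ⟨((n1 : Int), (n2 : Int)), List.mem_filter.mpr ⟨?_, ?_⟩, ?_⟩
  · exact (pvMem_pairsA points _).mpr ⟨by omega, by omega, by omega⟩
  · rw [pvValidA_iff]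
    rw [show (((n1 : Int), (n2 : Int)) : Int × Int).1 = (n1 : Int) from rfl,
        show (((n1 : Int), (n2 : Int)) : Int × Int).2 = (n2 : Int) from rfl]
    rw [hp1, hp2, e10, e11, e20, e21]
    exact ⟨fun h => h.elim hu hv, hc1, hc2⟩
  · simp only [pvAreaA]
    rw [hp1, hp2, e10, e11, e20, e21]

theorem pvMem_LA (points : List (List Int)) (a : Int) :
    a ∈ pvLA points ↔ pvRect points a := by
  constructor
  · intro ha
    unfold pvLA at ha
    obtain ⟨ij, hij, rfl⟩ := List.mem_map.mp ha
    obtain ⟨hmem, hval⟩ := List.mem_filter.mp hij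
    obtain ⟨hline, hc1, hc2⟩ := (pvValidA_iff points ij).mp hval
    obtain ⟨hb1, hb2, hb3⟩ := (pvMem_pairsA points ij).mp hmem
    have hjL : ij.2.toNat < points.length := by omega
    have hiL : ij.1.toNat < points.length := by omega
    have hp1 : pvP1 points ij.1 = points[ij.1.toNat] := pvP1_eq points ij.1 hb1 hiL
    have hp2 : pvP1 points ij.2 = points[ij.2.toNat] := pvP1_eq points ij.2 (by omega) hjL
    have hq1 : pvP1 points ij.1 ∈ points := by rw [hp1]; exact List.getElem_mem _
    have hq2 : pvP1 points ij.2 ∈ points := by rw [hp2]; exact List.getElem_mem _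
    refine ⟨pvPg (pvP1 points ij.1) 0, pvPg (pvP1 points ij.1) 1,
      pvPg (pvP1 points ij.2) 0, pvPg (pvP1 points ij.2) 1,
      ?_, ?_, hc1, hc2, ?_, ?_, ?_⟩
    · exact List.mem_map.mpr ⟨pvP1 points ij.1, hq1, rfl⟩
    · exact List.mem_map.mpr ⟨pvP1 points ij.2, hq2, rfl⟩
    · exact fun h => hline (Or.inl h)
    · exact fun h => hline (Or.inr h)
    · unfold pvAreaA; ring
  · rintro ⟨x1, y1, x2, y2, hco1, hco2, h3, h4, hx, hy, rfl⟩
    obtain ⟨q1, hq1, e1⟩ := List.mem_map.mp hco1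
    obtain ⟨q2, hq2, e2⟩ := List.mem_map.mp hco2
    rw [Prod.mk.injEq] at e1 e2
    obtain ⟨n1, hn1, g1⟩ := List.mem_iff_getElem.mp hq1
    obtain ⟨n2, hn2, g2⟩ := List.mem_iff_getElem.mp hq2
    have hneq : n1 ≠ n2 := by
      intro h
      subst h
      have hq : q1 = q2 := g1.symm.trans g2
      exact hx (by rw [← e1.1, ← e2.1, hq])
    rcases lt_or_gt_of_ne hneq with hlt | hgt
    · rw [show |x2 - x1| * |y2 - y1| = |y2 - y1| * |x2 - x1| from mul_comm _ _]
      exact pvLA_intro points n1 n2 hlt hn2 x1 y1 x2 y2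
        (by rw [g1]; exact e1.1) (by rw [g1]; exact e1.2)
        (by rw [g2]; exact e2.1) (by rw [g2]; exact e2.2) hx hy h3 h4
    · rw [show |x2 - x1| * |y2 - y1| = |y1 - y2| * |x1 - x2| by
        rw [abs_sub_comm x2 x1, abs_sub_comm y2 y1, mul_comm]]
      exact pvLA_intro points n2 n1 hgt hn1 x2 y2 x1 y1
        (by rw [g2]; exact e2.1) (by rw [g2]; exact e2.2)
        (by rw [g1]; exact e1.1) (by rw [g1]; exact e1.2)
        (Ne.symm hx) (Ne.symm hy) h4 h3

theorem pvA_char (points : List (List Int)) :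
    ∃ L : List Int, countMinRectangle_areg points = L.foldl pvUpd 0 ∧
      (∀ a, a ∈ L ↔ pvRect points a) :=
  ⟨pvLA points, pvA_eq_fold points, pvMem_LA points⟩

-- ---------- B as the running minimum over its candidate areas ----------

def pvGx (points : List (List Int)) (i : Int) : Int :=
  PySem.List.pyGetD (pvCols points).keys i 0

def pvColL (points : List (List Int)) (i : Int) : List Int :=
  (pvCols points).getD (pvGx points i) []

def pvQuadsB (points : List (List Int)) : List (Int × Int × Int × Int) :=
  (PySem.List.pyRange 1 (((pvCols points).keys.length : Int)) 1).flatMap (fun i =>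
    (PySem.List.pyRange 0 i 1).flatMap (fun k =>
      (pvColL points i).flatMap (fun ya =>
        (pvColL points k).map (fun yb => (i, k, ya, yb)))))

def pvValidB (points : List (List Int)) (q : Int × Int × Int × Int) : Bool :=
  decide (¬ q.2.2.1 = q.2.2.2) &&
  (decide ([pvGx points q.2.1, q.2.2.1] ∈ points) &&
   decide ([pvGx points q.1, q.2.2.2] ∈ points))

theorem pvValidB_iff (points : List (List Int)) (i k ya yb : Int) :
    pvValidB points (i, k, ya, yb) = true ↔
      ¬ ya = yb ∧ [pvGx points k, ya] ∈ points ∧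
      [pvGx points i, yb] ∈ points := by
  unfold pvValidB
  simp

def pvAreaB (points : List (List Int)) (q : Int × Int × Int × Int) : Int :=
  |pvGx points q.1 - pvGx points q.2.1| * |q.2.2.2 - q.2.2.1|

def pvLB (points : List (List Int)) : List Int :=
  ((pvQuadsB points).filter (pvValidB points)).map (pvAreaB points)

-- B's innermost body, as a function of the quadruple
def pvStepB (points : List (List Int)) (s : Int) (q : Int × Int × Int × Int) : Int :=
  if q.2.2.1 ≠ q.2.2.2 ∧ [pvGx points q.2.1, q.2.2.1] ∈ points ∧
      [pvGx points q.1, q.2.2.2] ∈ points then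
    let area := |pvGx points q.1 - pvGx points q.2.1| * |q.2.2.2 - q.2.2.1|
    if s = 0 ∨ area < s then area else s
  else s

theorem pvStepB_eq (points : List (List Int)) (s : Int) (q : Int × Int × Int × Int) :
    pvStepB points s q = if pvValidB points q = true then pvUpd s (pvAreaB points q) else s := by
  obtain ⟨i, k, ya, yb⟩ := q
  simp only [pvStepB]
  by_cases h : ya ≠ yb ∧ [pvGx points k, ya] ∈ points ∧
      [pvGx points i, yb] ∈ points
  · rw [if_pos h, if_pos ((pvValidB_iff points i k ya yb).mpr h)]
    rfl
  · rw [if_neg h, if_neg (fun hb => h ((pvValidB_iff points i k ya yb).mp hb))]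

theorem pvB_eq_fold (points : List (List Int)) :
    countMinRectangle_areg_alt points = (pvLB points).foldl pvUpd 0 := by
  have h1 : countMinRectangle_areg_alt points = (pvQuadsB points).foldl (pvStepB points) 0 := by
    unfold countMinRectangle_areg_alt pvQuadsB
    simp only [List.foldl_flatMap, List.foldl_map]
    rfl
  have h2 : (pvQuadsB points).foldl (pvStepB points) 0 =
      (pvQuadsB points).foldl
        (fun s q => if pvValidB points q = true then pvUpd s (pvAreaB points q) else s) 0 := by
    refine pvFoldl_congr_inv (fun _ => True) _ _ ?_ _ 0 trivial
    intro s q _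
    exact ⟨pvStepB_eq points s q, trivial⟩
  have h3 : (pvLB points).foldl pvUpd 0 =
      (pvQuadsB points).foldl
        (fun s q => if pvValidB points q = true then pvUpd s (pvAreaB points q) else s) 0 := by
    unfold pvLB
    rw [List.foldl_map, List.foldl_filter]
  rw [h1, h2, h3]

-- the dictionary invariant of B's grouping loop
def pvDInv (d : PySem.Dict Int (List Int)) : Prop :=
  d.keys.Nodup ∧ (∀ x, (d.getD x []).Nodup) ∧ (∀ x, d.getD x [] ≠ [] → x ∈ d.keys)

theorem pvColStep_inv (d : PySem.Dict Int (List Int)) (p : List Int) (h : pvDInv d) :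
    pvDInv (pvColStep d p) ∧
    ∀ x y, y ∈ (pvColStep d p).getD x [] ↔
      y ∈ d.getD x [] ∨ (pvPg p 0 = x ∧ pvPg p 1 = y) := by
  obtain ⟨hk, hv, hne⟩ := h
  unfold pvColStep
  by_cases hmem : pvPg p 1 ∈ d.getD (pvPg p 0) []
  · simp only [if_pos hmem]
    refine ⟨⟨hk, hv, hne⟩, ?_⟩
    intro x y
    constructor
    · exact Or.inl
    · rintro (h | ⟨rfl, rfl⟩)
      · exact h
      · exact hmem
  · simp only [if_neg hmem]
    refine ⟨⟨PySem.Dict.nodup_keys_insert _ _ _ hk, ?_, ?_⟩, ?_⟩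
    · intro x
      rw [PySem.Dict.getD_insert]
      split_ifs with hx
      · refine List.Nodup.append (hv _) (List.nodup_singleton _) ?_
        intro a ha hb
        rw [List.mem_singleton] at hb
        subst hb
        exact hmem ha
      · exact hv x
    · intro x hx
      rw [PySem.Dict.getD_insert] at hx
      rw [PySem.Dict.mem_keys_insert]
      split_ifs at hx with he
      · exact Or.inl he
      · exact Or.inr (hne x hx)
    · intro x y
      rw [PySem.Dict.getD_insert]
      split_ifs with hx
      · subst hx
        constructor
        · intro h
          rcases List.mem_append.mp h with h | h
          · exact Or.inl h
          · exact Or.inr ⟨rfl, (List.mem_singleton.mp h).symm⟩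
        · rintro (h | ⟨-, rfl⟩)
          · exact List.mem_append.mpr (Or.inl h)
          · exact List.mem_append.mpr (Or.inr (List.mem_singleton.mpr rfl))
      · constructor
        · exact Or.inl
        · rintro (h | ⟨rfl, rfl⟩)
          · exact h
          · exact absurd rfl hx

theorem pvCols_spec : ∀ (l : List (List Int)) (d : PySem.Dict Int (List Int)), pvDInv d →
    pvDInv (l.foldl pvColStep d) ∧
    ∀ x y, y ∈ (l.foldl pvColStep d).getD x [] ↔
      y ∈ d.getD x [] ∨ ∃ p ∈ l, pvPg p 0 = x ∧ pvPg p 1 = y := by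
  intro l
  induction l with
  | nil => intro d h; exact ⟨h, by simp⟩
  | cons p t ih =>
    intro d h
    obtain ⟨h1, h2⟩ := pvColStep_inv d p h
    obtain ⟨g1, g2⟩ := ih (pvColStep d p) h1
    refine ⟨g1, ?_⟩
    intro x y
    rw [List.foldl_cons, g2 x y, h2 x y]
    simp only [List.mem_cons]
    constructor
    · rintro ((h | h) | ⟨q, hq, e⟩)
      · exact Or.inl h
      · exact Or.inr ⟨p, Or.inl rfl, h⟩
      · exact Or.inr ⟨q, Or.inr hq, e⟩
    · rintro (h | ⟨q, (rfl | hq), e⟩)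
      · exact Or.inl (Or.inl h)
      · exact Or.inl (Or.inr e)
      · exact Or.inr ⟨q, hq, e⟩

theorem pvCols_inv (points : List (List Int)) : pvDInv (pvCols points) :=
  (pvCols_spec points PySem.Dict.empty
    ⟨by rw [PySem.Dict.keys_empty]; exact List.nodup_nil,
     fun x => by rw [PySem.Dict.getD_empty]; exact List.nodup_nil,
     fun x hx => absurd (PySem.Dict.getD_empty x []) hx⟩).1

theorem pvCols_getD_mem (points : List (List Int)) (x y : Int) :
    y ∈ (pvCols points).getD x [] ↔ ∃ p ∈ points, pvPg p 0 = x ∧ pvPg p 1 = y := by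
  have h := (pvCols_spec points PySem.Dict.empty
    ⟨by rw [PySem.Dict.keys_empty]; exact List.nodup_nil,
     fun x => by rw [PySem.Dict.getD_empty]; exact List.nodup_nil,
     fun x hx => absurd (PySem.Dict.getD_empty x []) hx⟩).2 x y
  unfold pvCols
  rw [h, PySem.Dict.getD_empty]
  simp

theorem pvCols_getD_coords (points : List (List Int)) (x y : Int) :
    y ∈ (pvCols points).getD x [] ↔ (x, y) ∈ pvCoords points := by
  rw [pvCols_getD_mem]
  unfold pvCoords
  simp [List.mem_map, Prod.ext_iff]

theorem pvMem_quadsB (points : List (List Int)) (i k ya yb : Int) :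
    (i, k, ya, yb) ∈ pvQuadsB points ↔
      (1 ≤ i ∧ i < (((pvCols points).keys.length : Int))) ∧
      (0 ≤ k ∧ k < i) ∧
      ya ∈ pvColL points i ∧ yb ∈ pvColL points k := by
  unfold pvQuadsB
  simp only [List.mem_flatMap, List.mem_map, PySem.List.mem_pyRange_one, Prod.mk.injEq]
  constructor
  · rintro ⟨i', hi', k', hk', ya', hya', yb', hyb', rfl, rfl, rfl, rfl⟩
    exact ⟨hi', hk', hya', hyb'⟩
  · rintro ⟨hi, hk, hya, hyb⟩
    exact ⟨i, hi, k, hk, ya, hya, yb, hyb, rfl, rfl, rfl, rfl⟩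

-- introduction rule for B's candidate list
theorem pvLB_intro (points : List (List Int)) (ip kp : Nat) (hki : kp < ip)
    (hip : ip < (pvCols points).keys.length) (ya yb : Int)
    (hya : ya ∈ pvColL points (ip : Int)) (hyb : yb ∈ pvColL points (kp : Int))
    (hne : ya ≠ yb)
    (hc1 : [pvGx points (kp : Int), ya] ∈ points)
    (hc2 : [pvGx points (ip : Int), yb] ∈ points) :
    |pvGx points (ip : Int) - pvGx points (kp : Int)| * |yb - ya| ∈ pvLB points := by
  unfold pvLB
  rw [List.mem_map]
  refine ⟨((ip : Int), (kp : Int), ya, yb), List.mem_filter.mpr ⟨?_, ?_⟩, rfl⟩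
  · rw [pvMem_quadsB]
    exact ⟨⟨by omega, by omega⟩, ⟨by omega, by omega⟩, hya, hyb⟩
  · rw [pvValidB_iff]
    exact ⟨hne, hc1, hc2⟩

theorem pvMem_LB (points : List (List Int)) (v : Int) :
    v ∈ pvLB points ↔ pvRect points v := by
  obtain ⟨hnk, hnv, hkey⟩ := pvCols_inv points
  constructor
  · intro hv
    unfold pvLB at hv
    obtain ⟨q, hq, rfl⟩ := List.mem_map.mp hv
    obtain ⟨hqm, hqv⟩ := List.mem_filter.mp hq
    obtain ⟨i, k, ya, yb⟩ := q
    obtain ⟨hvne, hvc1, hvc2⟩ := (pvValidB_iff points i k ya yb).mp hqv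
    obtain ⟨⟨hi1, hi2⟩, ⟨hk1, hk2⟩, hya, hyb⟩ := (pvMem_quadsB points i k ya yb).mp hqm
    have hiL : i.toNat < (pvCols points).keys.length := by omega
    have hkL : k.toNat < (pvCols points).keys.length := by omega
    have hgi : pvGx points i = (pvCols points).keys[i.toNat] := pvGetI _ i (by omega) hiL
    have hgk : pvGx points k = (pvCols points).keys[k.toNat] := pvGetI _ k hk1 hkL
    have hxik : pvGx points i ≠ pvGx points k := by
      rw [hgi, hgk]
      intro h
      have := (List.Nodup.getElem_inj_iff hnk).mp h
      omega
    refine ⟨pvGx points i, ya, pvGx points k, yb, ?_, ?_, ?_, ?_, hxik, hvne, ?_⟩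
    · exact (pvCols_getD_coords points _ ya).mp hya
    · exact (pvCols_getD_coords points _ yb).mp hyb
    · exact hvc1
    · exact hvc2
    · simp only [pvAreaB]
      rw [abs_sub_comm (pvGx points k) (pvGx points i)]
  · rintro ⟨x1, y1, x2, y2, hco1, hco2, h3, h4, hx, hy, rfl⟩
    have m11 : y1 ∈ (pvCols points).getD x1 [] := (pvCols_getD_coords points x1 y1).mpr hco1
    have m22 : y2 ∈ (pvCols points).getD x2 [] := (pvCols_getD_coords points x2 y2).mpr hco2
    have c21 : [x2, y1] ∈ points := h3
    have c12 : [x1, y2] ∈ points := h4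
    have hx1k : x1 ∈ (pvCols points).keys := hkey x1 (List.ne_nil_of_mem m11)
    have hx2k : x2 ∈ (pvCols points).keys := hkey x2 (List.ne_nil_of_mem m22)
    obtain ⟨n1, hn1, e1⟩ := List.mem_iff_getElem.mp hx1k
    obtain ⟨n2, hn2, e2⟩ := List.mem_iff_getElem.mp hx2k
    have hneq : n1 ≠ n2 := by
      intro h
      subst h
      exact hx (e1.symm.trans e2)
    have main : ∀ (ip kp : Nat), kp < ip → ∀ (hip : ip < (pvCols points).keys.length),
        ∀ (hkp : kp < (pvCols points).keys.length) (u u' : Int),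
        (pvCols points).keys[ip]'hip = u → (pvCols points).keys[kp]'hkp = u' →
        ((u = x1 ∧ u' = x2) ∨ (u = x2 ∧ u' = x1)) →
        |x2 - x1| * |y2 - y1| ∈ pvLB points := by
      intro ip kp hki hip hkp u u' eu eu' hor
      have hgu : pvGx points (ip : Int) = u := by
        unfold pvGx
        rw [pvGetI _ _ (by omega) (by simpa using hip)]
        simpa using eu
      have hgu' : pvGx points (kp : Int) = u' := by
        unfold pvGx
        rw [pvGetI _ _ (by omega) (by simpa using hkp)]
        simpa using eu'
      rcases hor with ⟨hu1, hu2⟩ | ⟨hu1, hu2⟩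
      · -- column ip is x1, column kp is x2: take ya := y1, yb := y2
        have hgx1 : pvGx points (ip : Int) = x1 := by rw [hgu, hu1]
        have hgx2 : pvGx points (kp : Int) = x2 := by rw [hgu', hu2]
        have := pvLB_intro points ip kp hki hip y1 y2
          (by unfold pvColL; rw [hgx1]; exact m11)
          (by unfold pvColL; rw [hgx2]; exact m22)
          hy (by rw [hgx2]; exact c21) (by rw [hgx1]; exact c12)
        rw [hgx1, hgx2] at this
        rwa [abs_sub_comm x1 x2] at this
      · -- column ip is x2, column kp is x1: take ya := y2, yb := y1
        have hgx2 : pvGx points (ip : Int) = x2 := by rw [hgu, hu1]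
        have hgx1 : pvGx points (kp : Int) = x1 := by rw [hgu', hu2]
        have := pvLB_intro points ip kp hki hip y2 y1
          (by unfold pvColL; rw [hgx2]; exact m22)
          (by unfold pvColL; rw [hgx1]; exact m11)
          (Ne.symm hy) (by rw [hgx1]; exact c12) (by rw [hgx2]; exact c21)
        rw [hgx2, hgx1] at this
        rwa [abs_sub_comm y1 y2] at this
    rcases lt_or_gt_of_ne hneq with hlt | hgt
    · exact main n2 n1 hlt hn2 hn1 x2 x1 e2 e1 (Or.inr ⟨rfl, rfl⟩)
    · exact main n1 n2 hgt hn1 hn2 x1 x2 e1 e2 (Or.inl ⟨rfl, rfl⟩)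

theorem pvB_char (points : List (List Int)) :
    ∃ L : List Int, countMinRectangle_areg_alt points = L.foldl pvUpd 0 ∧
      (∀ a, a ∈ L ↔ pvRect points a) :=
  ⟨pvLB points, pvB_eq_fold points, pvMem_LB points⟩

-- ===== VERDICT (by name: the statement is the Claim_ definition above) =====
theorem countMinRectangle_areg_spec : Claim_equal_countMinRectangle_areg := by
  intro points _hd _hpre
  unfold Spec_countMinRectangle_areg
  obtain ⟨LA, hA, hmA⟩ := pvA_char points
  obtain ⟨LB, hB, hmB⟩ := pvB_char points
  rw [hA, hB]
  exact pvFold_min_eq LA LB (fun a => (hmA a).trans (hmB a).symm)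
    (fun a ha => pvRect_pos points a ((hmA a).mp ha))
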